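-- pv_equiv track=rewrite | github.com/DaanMarchal/ucodes_find_buildings | src/question_1.py | add_new_space
-- ===== SOURCE A (Python) =====
-- def neighbours(space, new_space):
--     row_diff = abs(space[0] - new_space[0])
--     column_diff = abs(space[1] - new_space[1])
--     if row_diff + column_diff == 1:
--         return True
--     return False
--
-- def reconsider(new_space, newly_extended_building, buildings_found):
--     """
--     Given a new_space (part of newly_extended_building),
--     check whether it is also part of any other buildings.
--     In that case we merge them into one and return the new list.
--
--     we check
--     :param new_space: Space which was found to be part of building newly_extended_building.
--     :param newly_extended_building: Building which just had a new space added to it.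
--     :param buildings_found: Buildings found up until now.
--     :return: Updated list of buildings.
--     """
--     neighbouring_buildings = []
--     for index, building in enumerate(buildings_found):
--         if not (building == newly_extended_building):
--             for space in building:
--                 if neighbours(space, new_space):
--                     neighbouring_buildings.append(building)
--                     break
--     if neighbouring_buildings:
--         for neighbouring_building in neighbouring_buildings:
--             for space in neighbouring_building:
--                 newly_extended_building.append(space)
--             buildings_found.remove(neighbouring_building)
--     return buildings_found
--
-- def add_new_space(new_space, buildings_found):
--     for building in buildings_found:
--         for space in building:
--             if neighbours(space, new_space):
--                 building.append(new_space)
--                 # New space could be neighbour of more than one existing building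
--                 return reconsider(new_space, building, buildings_found)
--     buildings_found.append([new_space])
--     return buildings_found
-- ===== SOURCE B (Python) =====
-- def add_new_space(new_space, buildings_found):
--     """Single partition pass: find the first neighbouring building, then split the
--     remaining buildings into neighbours (merged in order) and non-neighbours (kept)."""
--     def hit(building):
--         return any(abs(s[0] - new_space[0]) + abs(s[1] - new_space[1]) == 1
--                    for s in building)
--     try:
--         k = next(i for i, b in enumerate(buildings_found) if hit(b))
--     except StopIteration:
--         buildings_found.append([new_space])
--         return buildings_found
--     merged = buildings_found[k] + [new_space]
--     kept = []
--     for b in buildings_found[k + 1:]: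
--         if hit(b):
--             merged = merged + b
--         else:
--             kept.append(b)
--     return buildings_found[:k] + [merged] + kept
-- ===== Notes on version B (the rewrite author's own statement) =====
-- stated objective: simpler
-- what changed: A finds the first neighbouring building, mutates it in place, then re-scans the whole list and repeatedly calls list.remove to merge further neighbours; B makes one partition pass over the tail, accumulating the merged building and the kept buildings directly, with no re-scan and no remove calls.
import Mathlib
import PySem

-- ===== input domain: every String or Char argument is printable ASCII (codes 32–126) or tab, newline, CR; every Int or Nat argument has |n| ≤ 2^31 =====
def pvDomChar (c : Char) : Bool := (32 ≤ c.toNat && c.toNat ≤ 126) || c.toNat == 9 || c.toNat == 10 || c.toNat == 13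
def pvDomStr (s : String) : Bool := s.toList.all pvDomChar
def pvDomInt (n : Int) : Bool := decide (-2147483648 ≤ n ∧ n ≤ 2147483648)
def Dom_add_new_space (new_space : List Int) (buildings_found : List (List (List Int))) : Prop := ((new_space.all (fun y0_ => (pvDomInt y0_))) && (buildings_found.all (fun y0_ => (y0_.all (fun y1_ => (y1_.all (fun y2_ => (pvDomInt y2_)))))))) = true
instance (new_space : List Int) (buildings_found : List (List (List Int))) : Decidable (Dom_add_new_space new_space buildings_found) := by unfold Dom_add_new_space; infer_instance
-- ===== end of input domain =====

-- B replaces A's mutate-then-rescan-and-remove merge by a single partition pass over the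
-- tail (simpler, no list.remove); equivalence is about the RETURN value only — Python A
-- mutates buildings_found in place (B only appends in the no-neighbour case).


-- ===== PORT A =====
-- neighbours(space, new_space); indices 0/1 are in range under Pre_, so pyGetD is exact there
def pvNeighbours (space new_space : List Int) : Bool :=
  let row_diff := (PySem.List.pyGetD space (0 : Int) 0 - PySem.List.pyGetD new_space (0 : Int) 0).natAbs
  let column_diff := (PySem.List.pyGetD space (1 : Int) 0 - PySem.List.pyGetD new_space (1 : Int) 0).natAbs
  if row_diff + column_diff = 1 then true else false

-- buildings_found.remove(v): drop the first value-equal entry (Bool marks the mutated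
-- 'newly_extended_building' object; in-place mutation is simulated via this identity marker)
def pvRemoveVal (v : List (List Int)) : List (Bool × List (List Int)) → List (Bool × List (List Int))
  | [] => []
  | e :: rest => if e.2 = v then rest else e :: pvRemoveVal v rest

-- reconsider(new_space, newly_extended_building, buildings_found)
def pvReconsider (new_space : List Int) (ext : List (List Int))
    (marked : List (Bool × List (List Int))) : List (List (List Int)) :=
  let nbs := (marked.filter (fun e => decide (e.2 ≠ ext) && e.2.any (fun s => pvNeighbours s new_space))).map (·.2)
  if nbs = [] then marked.map (·.2)
  else (nbs.foldl (fun st nb =>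
      pvRemoveVal nb (st.map (fun e => if e.1 then (e.1, e.2 ++ nb) else e))) marked).map (·.2)

-- the for-loop of add_new_space: first building with a neighbouring space is extended and marked
def pvAddGo (new_space : List Int) : List (List (List Int)) → Option (List (List Int) × List (Bool × List (List Int)))
  | [] => none
  | b :: rest =>
    if b.any (fun s => pvNeighbours s new_space) then
      some (b ++ [new_space], (true, b ++ [new_space]) :: rest.map (fun x => (false, x)))
    else (pvAddGo new_space rest).map (fun p => (p.1, (false, b) :: p.2))

def add_new_space (new_space : List Int) (buildings_found : List (List (List Int))) : List (List (List Int)) :=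
  match pvAddGo new_space buildings_found with
  | none => buildings_found ++ [[new_space]]
  | some (ext, marked) => pvReconsider new_space ext marked

-- ===== PORT B =====
def pvAdj (new_space s : List Int) : Bool :=
  (PySem.List.pyGetD s (0 : Int) 0 - PySem.List.pyGetD new_space (0 : Int) 0).natAbs
    + (PySem.List.pyGetD s (1 : Int) 0 - PySem.List.pyGetD new_space (1 : Int) 0).natAbs = 1

def pvHit (new_space : List Int) (b : List (List Int)) : Bool := b.any (pvAdj new_space)

def add_new_space_alt (new_space : List Int) (buildings_found : List (List (List Int))) : List (List (List Int)) :=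
  match buildings_found.findIdx? (pvHit new_space) with
  | none => buildings_found ++ [[new_space]]
  | some k =>
    let merged := buildings_found.getD k [] ++ [new_space]
    let mr := (buildings_found.drop (k + 1)).foldl
      (fun (p : List (List Int) × List (List (List Int))) b =>
        if pvHit new_space b then (p.1 ++ b, p.2) else (p.1, p.2 ++ [b])) (merged, [])
    buildings_found.take k ++ [mr.1] ++ mr.2

-- ===== PRECONDITION & SPEC =====
-- Pre_ requires every space — and, as soon as some building is nonempty, new_space — to have
-- ≥ 2 coordinates (A raises IndexError on shorter spaces it compares) and excludes inputs where some building already contains both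
-- new_space and a neighbour of it: there A still returns, but reconsider's value-equality skip
-- ('building == newly_extended_building') can silently leave an unmerged duplicate of the
-- extended building, an accident of comparing lists by value; B merges it like any other
-- neighbour.
def Pre_add_new_space (new_space : List Int) (buildings_found : List (List (List Int))) : Prop :=
  ((∃ b ∈ buildings_found, b ≠ []) → 2 ≤ new_space.length) ∧
    (∀ b ∈ buildings_found, ∀ s ∈ b, 2 ≤ s.length) ∧
    (∀ b ∈ buildings_found, new_space ∈ b → ∀ s ∈ b,
      (s.getD 0 0 - new_space.getD 0 0).natAbs + (s.getD 1 0 - new_space.getD 1 0).natAbs ≠ 1)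
instance (new_space : List Int) (buildings_found : List (List (List Int))) : Decidable (Pre_add_new_space new_space buildings_found) := by unfold Pre_add_new_space; infer_instance

def pvWitness_add_new_space : List Int × List (List (List Int)) := ([0, 0], [[[0, 1]], [[5, 5]]])

def Spec_add_new_space (new_space : List Int) (buildings_found : List (List (List Int))) (out : List (List (List Int))) : Prop := out = add_new_space_alt new_space buildings_found
instance (new_space : List Int) (buildings_found : List (List (List Int))) (out : List (List (List Int))) : Decidable (Spec_add_new_space new_space buildings_found out) := by unfold Spec_add_new_space; infer_instance

-- ===== CLAIM (what is proved, stated in full; the proofs are below) =====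
def Claim_equal_add_new_space : Prop := ∀ (new_space : List Int) (buildings_found : List (List (List Int))), Dom_add_new_space new_space buildings_found → Pre_add_new_space new_space buildings_found → Spec_add_new_space new_space buildings_found (add_new_space new_space buildings_found)

-- ===== LEMMAS AND PROOFS =====

-- A's neighbours test and B's adjacency test compute the same Boolean
theorem pv_nb_eq (ns s : List Int) : pvNeighbours s ns = pvAdj ns s := by
  simp [pvNeighbours, pvAdj]

theorem pv_anyNb_eq (ns : List Int) (b : List (List Int)) :
    (b.any (fun s => pvNeighbours s ns)) = pvHit ns b := by
  simp [pvHit, pv_nb_eq]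

theorem pvRemoveVal_skip (v : List (List Int)) (l₁ l₂ : List (Bool × List (List Int)))
    (h : ∀ e ∈ l₁, e.2 ≠ v) : pvRemoveVal v (l₁ ++ l₂) = l₁ ++ pvRemoveVal v l₂ := by
  induction l₁ with
  | nil => rfl
  | cons e rest ih =>
    simp only [List.cons_append, pvRemoveVal, if_neg (h e (by simp))]
    rw [ih (fun e he => h e (by simp [he]))]

-- the merge fold of reconsider, over a state (true, e) :: M(false,non-hit) ++ suf(false)
theorem pv_fold_mid (ns : List Int) (suf M : List (List (List Int))) (e : List (List Int))
    (he : e ≠ []) (hM : ∀ b ∈ M, pvHit ns b = false) :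
    ((suf.filter (pvHit ns)).foldl (fun st nb =>
        pvRemoveVal nb (st.map (fun x => if x.1 then (x.1, x.2 ++ nb) else x)))
      ((true, e) :: M.map (fun x => (false, x)) ++ suf.map (fun x => (false, x))))
    = (true, e ++ (suf.filter (pvHit ns)).flatten) :: M.map (fun x => (false, x))
        ++ (suf.filter (fun b => !pvHit ns b)).map (fun x => (false, x)) := by
  induction suf generalizing M e with
  | nil => simp
  | cons b rest ih =>
    by_cases hb : pvHit ns b = true
    · rw [List.filter_cons_of_pos (by simp [hb]), List.foldl_cons]
      have hne : e ++ b ≠ b := fun hc => he (by simpa using congrArg List.length hc)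
      have hstep : pvRemoveVal b ((((true, e) : Bool × List (List Int)) :: M.map (fun x => ((false : Bool), x)) ++
          (b :: rest).map (fun x => ((false : Bool), x))).map (fun x => if x.1 then (x.1, x.2 ++ b) else x))
          = (true, e ++ b) :: M.map (fun x => ((false : Bool), x)) ++ rest.map (fun x => ((false : Bool), x)) := by
        have hmap : ((((true, e) : Bool × List (List Int)) :: M.map (fun x => ((false : Bool), x)) ++
            (b :: rest).map (fun x => ((false : Bool), x))).map (fun x => if x.1 then (x.1, x.2 ++ b) else x))
            = ((true, e ++ b) :: M.map (fun x => ((false : Bool), x))) ++ (b :: rest).map (fun x => ((false : Bool), x)) := by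
          simp [Function.comp_def]
        rw [hmap]
        have hskip : ∀ x ∈ (((true, e ++ b) : Bool × List (List Int)) :: M.map (fun x => ((false : Bool), x))), x.2 ≠ b := by
          intro x hx
          rcases List.mem_cons.1 hx with rfl | hx
          · exact hne
          · obtain ⟨m, hm, rfl⟩ := List.mem_map.1 hx
            intro hc
            have hc' : m = b := hc
            have hm' := hM m hm
            rw [hc', hb] at hm'
            exact absurd hm' (by simp)
        rw [pvRemoveVal_skip b _ _ hskip]
        simp [pvRemoveVal]
      rw [hstep, ih M (e ++ b) (fun hc => he (List.append_eq_nil_iff.1 hc).1) hM]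
      simp [hb, List.append_assoc]
    · simp only [Bool.not_eq_true] at hb
      rw [List.filter_cons_of_neg (by simp [hb])]
      have hshape : ((true, e) : Bool × List (List Int)) :: M.map (fun x => ((false : Bool), x)) ++ (b :: rest).map (fun x => ((false : Bool), x))
          = (true, e) :: (M ++ [b]).map (fun x => ((false : Bool), x)) ++ rest.map (fun x => ((false : Bool), x)) := by
        simp
      have hM' : ∀ b' ∈ M ++ [b], pvHit ns b' = false := by
        intro b' hb'
        rcases List.mem_append.1 hb' with h | h
        · exact hM b' h
        · rw [List.mem_singleton.1 h]; exact hb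
      rw [hshape, ih (M ++ [b]) e he hM']
      rw [List.filter_cons_of_pos (by simp [hb])]
      simp

-- the filter inside reconsider, on the tail of the marked list, is the hit-filter
theorem pv_marked_nbs (ns : List Int) (ext : List (List Int)) (suf : List (List (List Int)))
    (hns : ∀ b ∈ suf, pvHit ns b = true → b ≠ ext) :
    ((suf.map (fun x => ((false : Bool), x))).filter
        (fun e => decide (e.2 ≠ ext) && e.2.any (fun s => pvNeighbours s ns))).map (·.2)
    = suf.filter (pvHit ns) := by
  induction suf with
  | nil => rfl
  | cons b rest ih =>
    have ih' := ih (fun b' hb' h => hns b' (by simp [hb']) h)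
    by_cases hb : pvHit ns b = true
    · have hne : b ≠ ext := hns b (by simp) hb
      rw [List.map_cons, List.filter_cons_of_pos (by simp only [pv_anyNb_eq]; simp [hb, hne]),
        List.map_cons, ih', List.filter_cons_of_pos (by simp [hb])]
    · simp only [Bool.not_eq_true] at hb
      rw [List.map_cons, List.filter_cons_of_neg (by simp only [pv_anyNb_eq]; simp [hb]), ih',
        List.filter_cons_of_neg (by simp [hb])]

-- reconsider on (true, ext) :: suf(false): full characterisation
theorem pv_reconsider_hit (ns : List Int) (b0 : List (List Int)) (suf : List (List (List Int)))
    (hns : ∀ b ∈ suf, pvHit ns b = true → b ≠ b0 ++ [ns]) :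
    pvReconsider ns (b0 ++ [ns]) ((true, b0 ++ [ns]) :: suf.map (fun x => (false, x)))
    = (b0 ++ [ns] ++ (suf.filter (pvHit ns)).flatten) :: suf.filter (fun b => !pvHit ns b) := by
  simp only [pvReconsider]
  rw [List.filter_cons_of_neg (by simp), pv_marked_nbs ns (b0 ++ [ns]) suf hns]
  by_cases h : suf.filter (pvHit ns) = []
  · rw [h, if_pos rfl]
    have hall : ∀ b ∈ suf, ¬ pvHit ns b = true := List.filter_eq_nil_iff.1 h
    rw [List.filter_eq_self.2 (fun b hb => by simp [hall b hb])]
    simp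
  · rw [if_neg h]
    have hfold := pv_fold_mid ns suf [] (b0 ++ [ns]) (by simp) (by simp)
    simp only [List.map_nil, List.singleton_append] at hfold
    rw [hfold]
    simp

-- the merge fold skips a leading non-hit (false, b) entry
theorem pv_fold_cons (ns : List Int) (b : List (List Int)) (hb : pvHit ns b = false)
    (nbs : List (List (List Int))) (hnbs : ∀ nb ∈ nbs, pvHit ns nb = true) :
    ∀ st : List (Bool × List (List Int)),
      nbs.foldl (fun st nb => pvRemoveVal nb (st.map (fun x => if x.1 then (x.1, x.2 ++ nb) else x)))
        ((false, b) :: st)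
      = (false, b) :: nbs.foldl (fun st nb =>
          pvRemoveVal nb (st.map (fun x => if x.1 then (x.1, x.2 ++ nb) else x))) st := by
  induction nbs with
  | nil => intro st; rfl
  | cons nb rest ih =>
    intro st
    have hbne : ¬ ((false, b) : Bool × List (List Int)).2 = nb := by
      intro hc
      have := hnbs nb (by simp)
      rw [← hc, hb] at this
      exact absurd this (by simp)
    rw [List.foldl_cons, List.foldl_cons]
    have hstep : pvRemoveVal nb ((((false, b) : Bool × List (List Int)) :: st).map
          (fun x => if x.1 then (x.1, x.2 ++ nb) else x))
        = (false, b) :: pvRemoveVal nb (st.map (fun x => if x.1 then (x.1, x.2 ++ nb) else x)) := by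
      rw [List.map_cons]
      simp only [pvRemoveVal]
      simp [hbne]
    rw [hstep, ih (fun nb h => hnbs nb (by simp [h]))]

-- reconsider commutes with a non-hit head entry
theorem pv_reconsider_cons (ns : List Int) (ext : List (List Int)) (b : List (List Int))
    (marked : List (Bool × List (List Int))) (hb : pvHit ns b = false) :
    pvReconsider ns ext ((false, b) :: marked) = b :: pvReconsider ns ext marked := by
  simp only [pvReconsider]
  rw [List.filter_cons_of_neg (by simp only [pv_anyNb_eq]; simp [hb])]
  by_cases h : ((marked.filter (fun e => decide (e.2 ≠ ext) && e.2.any (fun s => pvNeighbours s ns))).map (·.2)) = []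
  · rw [h]; simp
  · rw [if_neg h, if_neg h]
    have hnbs : ∀ nb ∈ (marked.filter (fun e => decide (e.2 ≠ ext) && e.2.any (fun s => pvNeighbours s ns))).map (·.2), pvHit ns nb = true := by
      intro nb hnb
      obtain ⟨e, he, rfl⟩ := List.mem_map.1 hnb
      have := List.of_mem_filter he
      simp only [Bool.and_eq_true, pv_anyNb_eq] at this
      exact this.2
    rw [pv_fold_cons ns b hb _ hnbs marked, List.map_cons]

-- B's partition fold characterised
theorem pv_foldB (ns : List Int) (suf : List (List (List Int))) :
    ∀ m r, suf.foldl (fun (p : List (List Int) × List (List (List Int))) b =>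
        if pvHit ns b then (p.1 ++ b, p.2) else (p.1, p.2 ++ [b])) (m, r)
      = (m ++ (suf.filter (pvHit ns)).flatten, r ++ suf.filter (fun b => !pvHit ns b)) := by
  induction suf with
  | nil => intro m r; simp
  | cons b rest ih =>
    intro m r
    by_cases hb : pvHit ns b = true
    · rw [List.foldl_cons, if_pos hb, ih, List.filter_cons_of_pos (by simp [hb]),
        List.filter_cons_of_neg (by simp [hb])]
      simp
    · simp only [Bool.not_eq_true] at hb
      rw [List.foldl_cons, if_neg (by simp [hb]), ih, List.filter_cons_of_neg (by simp [hb]),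
        List.filter_cons_of_pos (by simp [hb])]
      simp

-- A on a non-hit head building
theorem pv_A_cons (ns : List Int) (b : List (List Int)) (rest : List (List (List Int)))
    (hb : pvHit ns b = false) :
    add_new_space ns (b :: rest) = b :: add_new_space ns rest := by
  simp only [add_new_space, pvAddGo, pv_anyNb_eq, hb, Bool.false_eq_true, if_false]
  cases hgo : pvAddGo ns rest with
  | none => simp
  | some p =>
    obtain ⟨ext, marked⟩ := p
    simp only [Option.map_some]
    exact pv_reconsider_cons ns ext b marked hb

-- B on a non-hit head building
theorem pv_B_cons (ns : List Int) (b : List (List Int)) (rest : List (List (List Int)))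
    (hb : pvHit ns b = false) :
    add_new_space_alt ns (b :: rest) = b :: add_new_space_alt ns rest := by
  simp only [add_new_space_alt, List.findIdx?_cons, hb, Bool.false_eq_true, if_false]
  cases hfi : rest.findIdx? (pvHit ns) with
  | none => simp
  | some k =>
    simp only [Option.map_some]
    simp [List.take_succ_cons, List.drop_succ_cons]

-- pvAdj in terms of plain getD (indices 0 and 1 are nonnegative)
theorem pv_adj_getD (ns s : List Int) :
    pvAdj ns s = true ↔
      (s.getD 0 0 - ns.getD 0 0).natAbs + (s.getD 1 0 - ns.getD 1 0).natAbs = 1 := by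
  constructor <;> intro h <;> simpa [pvAdj, PySem.List.pyGetD_ofNat', PySem.List.pyGetD_zero] using h

theorem pv_main (ns : List Int) (bf : List (List (List Int)))
    (hPre : ∀ b ∈ bf, ns ∈ b → ∀ s ∈ b,
      (s.getD 0 0 - ns.getD 0 0).natAbs + (s.getD 1 0 - ns.getD 1 0).natAbs ≠ 1) :
    add_new_space ns bf = add_new_space_alt ns bf := by
  induction bf with
  | nil => rfl
  | cons b rest ih =>
    by_cases hb : pvHit ns b = true
    · have hA : add_new_space ns (b :: rest)
          = pvReconsider ns (b ++ [ns]) ((true, b ++ [ns]) :: rest.map (fun x => (false, x))) := by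
        simp only [add_new_space, pvAddGo, pv_anyNb_eq, hb, if_true]
      have hsep : ∀ b' ∈ rest, pvHit ns b' = true → b' ≠ b ++ [ns] := by
        intro b' hb' hhit hc
        obtain ⟨s, hs, hadj⟩ := List.any_eq_true.1 hhit
        exact hPre b' (by simp [hb']) (hc ▸ (by simp)) s hs ((pv_adj_getD ns s).1 hadj)
      rw [hA, pv_reconsider_hit ns b rest hsep]
      simp only [add_new_space_alt, List.findIdx?_cons, hb, if_true, List.drop_succ_cons,
        List.drop_zero, List.getD_cons_zero, List.take_zero]
      rw [pv_foldB ns rest (b ++ [ns]) []]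
      simp [List.append_assoc]
    · simp only [Bool.not_eq_true] at hb
      rw [pv_A_cons ns b rest hb, pv_B_cons ns b rest hb,
        ih (fun b' hb' => hPre b' (by simp [hb']))]

-- ===== VERDICT (by name: the statement is the Claim_ definition above) =====
theorem add_new_space_spec : Claim_equal_add_new_space := by
  intro ns bf _ hPre
  unfold Spec_add_new_space
  exact pv_main ns bf hPre.2.2
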